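-- pv_equiv track=rewrite | github.com/freelulul/ppd | ppd/experiments/append_prefill_analysis.py | generate_append_text
-- ===== SOURCE A (Python) =====
-- def generate_append_text(num_tokens: int) -> str:
--     """Generate the new append prompt"""
--     # Create a question/instruction that's roughly num_tokens long
--     base_prompt = "Based on the above context, please provide a brief answer: "
--     filler = "Additional context for this query includes relevant information about the topic. "
--
--     chars_needed = num_tokens * 4
--     result = base_prompt
--
--     while len(result) < chars_needed:
--         result += filler
--
--     return result[:chars_needed]
-- ===== SOURCE B (Python) =====
-- def generate_append_text(num_tokens: int) -> str:
--     """Generate the new append prompt"""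
--     base_prompt = "Based on the above context, please provide a brief answer: "
--     filler = "Additional context for this query includes relevant information about the topic. "
--
--     chars_needed = num_tokens * 4
--     # closed-form repetition count instead of a growth loop
--     count = max(0, (chars_needed - len(base_prompt) + len(filler) - 1) // len(filler))
--     return (base_prompt + filler * count)[:chars_needed]
-- ===== Notes on version B (the rewrite author's own statement) =====
-- stated objective: faster
-- what changed: Replaces the while-loop that repeatedly appends the filler (quadratic repeated concatenation) with a closed-form ceiling-division repetition count and a single string multiply.
import Mathlib
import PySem

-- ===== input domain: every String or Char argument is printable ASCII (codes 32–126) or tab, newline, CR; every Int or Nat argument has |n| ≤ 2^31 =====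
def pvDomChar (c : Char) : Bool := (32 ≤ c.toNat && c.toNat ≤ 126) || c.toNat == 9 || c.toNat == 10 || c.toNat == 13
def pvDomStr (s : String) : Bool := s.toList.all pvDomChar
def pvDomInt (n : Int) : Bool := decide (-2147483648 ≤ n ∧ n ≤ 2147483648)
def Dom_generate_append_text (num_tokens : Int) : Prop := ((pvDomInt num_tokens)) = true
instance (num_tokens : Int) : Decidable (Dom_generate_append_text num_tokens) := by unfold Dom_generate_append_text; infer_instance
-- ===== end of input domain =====

-- B replaces A's append-until-long-enough while loop with a closed-form ceiling-division
-- repetition count and a single repetition (simpler).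


-- ===== PORT A =====
def pvBase : List Char := "Based on the above context, please provide a brief answer: ".toList
def pvFiller : List Char := "Additional context for this query includes relevant information about the topic. ".toList

-- the 'while len(result) < chars_needed: result += filler' loop of A
def pvFillLoop (chars_needed : Int) (result : List Char) : List Char :=
  if (result.length : Int) < chars_needed then
    pvFillLoop chars_needed (result ++ pvFiller)
  else
    result
termination_by (chars_needed - result.length).toNat
decreasing_by
  simp only [List.length_append]
  have hf : pvFiller.length = 81 := by decide
  omega

def generate_append_text (num_tokens : Int) : String :=
  let chars_needed : Int := num_tokens * 4
  String.ofList (PySem.List.slice (pvFillLoop chars_needed pvBase) none (some chars_needed))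

-- ===== PORT B =====
def generate_append_text_alt (num_tokens : Int) : String :=
  let chars_needed : Int := num_tokens * 4
  let count : Int :=
    max 0 (PySem.Int.floordiv (chars_needed - (pvBase.length : Int) + (pvFiller.length : Int) - 1)
            (pvFiller.length : Int))
  String.ofList (PySem.List.slice (pvBase ++ PySem.List.pyRepeat pvFiller count) none (some chars_needed))

-- ===== PRECONDITION & SPEC =====
def Spec_generate_append_text (num_tokens : Int) (out : String) : Prop := out = generate_append_text_alt num_tokens
instance (num_tokens : Int) (out : String) : Decidable (Spec_generate_append_text num_tokens out) := by unfold Spec_generate_append_text; infer_instance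

-- ===== CLAIM (what is proved, stated in full; the proofs are below) =====
def Claim_equal_generate_append_text : Prop := ∀ (num_tokens : Int), Dom_generate_append_text num_tokens → Spec_generate_append_text num_tokens (generate_append_text num_tokens)

-- ===== LEMMAS AND PROOFS =====

-- A's loop produces exactly the closed-form number of filler copies appended to its start state.
theorem pvFillLoop_eq (c : Int) (r : List Char) :
    pvFillLoop c r =
      r ++ PySem.List.pyRepeat pvFiller (max 0 (PySem.Int.floordiv (c - (r.length : Int) + 80) 81)) := by
  rw [pvFillLoop]
  have hf : pvFiller.length = 81 := by decide
  split
  · next h =>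
    rw [pvFillLoop_eq c (r ++ pvFiller)]
    have hlen : ((r ++ pvFiller).length : Int) = (r.length : Int) + 81 := by
      simp [List.length_append, hf]
    rw [hlen]
    have key : c - ((r.length : Int) + 81) + 80 + 1 * 81 = c - (r.length : Int) + 80 := by ring
    have hstep : PySem.Int.floordiv (c - (r.length : Int) + 80) 81
        = PySem.Int.floordiv (c - ((r.length : Int) + 81) + 80) 81 + 1 := by
      simp only [PySem.Int.floordiv]
      rw [← key, Int.add_mul_fdiv_right _ _ (by norm_num)]
    have hnn : 0 ≤ PySem.Int.floordiv (c - ((r.length : Int) + 81) + 80) 81 := by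
      simp only [PySem.Int.floordiv]
      exact Int.fdiv_nonneg (by omega) (by norm_num)
    set d := PySem.Int.floordiv (c - ((r.length : Int) + 81) + 80) 81 with hd
    have hmax1 : max 0 d = d := by omega
    have hmax2 : max 0 (d + 1) = d + 1 := by omega
    rw [hstep, hmax1, hmax2]
    have htn : (d + 1).toNat = d.toNat + 1 := by omega
    simp [PySem.List.pyRepeat, htn, List.replicate_succ]
  · next h =>
    have hle : PySem.Int.floordiv (c - (r.length : Int) + 80) 81 < 1 := by
      rw [PySem.Int.floordiv_lt_iff_lt_mul (by norm_num)]
      omega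
    have hmax : (max 0 (PySem.Int.floordiv (c - (r.length : Int) + 80) 81)).toNat = 0 := by omega
    rw [PySem.List.pyRepeat, hmax]
    simp
termination_by (c - r.length).toNat
decreasing_by
  simp only [List.length_append]
  have hf : pvFiller.length = 81 := by decide
  omega

-- ===== VERDICT (by name: the statement is the Claim_ definition above) =====
theorem generate_append_text_spec : Claim_equal_generate_append_text := by
  intro n _
  unfold Spec_generate_append_text
  have hb : (pvBase.length : Int) = 59 := by decide
  have hf : (pvFiller.length : Int) = 81 := by decide
  show String.ofList (PySem.List.slice (pvFillLoop (n * 4) pvBase) none (some (n * 4))) =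
    String.ofList (PySem.List.slice
      (pvBase ++ PySem.List.pyRepeat pvFiller
        (max 0 (PySem.Int.floordiv (n * 4 - (pvBase.length : Int) + (pvFiller.length : Int) - 1)
          (pvFiller.length : Int)))) none (some (n * 4)))
  rw [pvFillLoop_eq, hb, hf]
  have h80 : n * 4 - 59 + 81 - 1 = n * 4 - 59 + 80 := by ring
  rw [h80]
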